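-- pv_equiv track=rewrite | github.com/Tuan-H-Nguyen/Atomic-based-QSPR-for-fusenes-and-derivatives | data/data_exam.py | s_filter2
-- ===== SOURCE A (Python) =====
-- def s_filter2(smiles_list):
--     result1 = 0
--     result2 = 0
--     for smiles in smiles_list:
--         if "S" in smiles or  "s" in smiles:
--             if smiles.count("s") == 1:
--                 result1 += 1
--             elif smiles.count("s") == 2:
--                 result2 += 1
--     return result1, result2
-- ===== SOURCE B (Python) =====
-- def s_filter2(smiles_list):
--     # Character-level saturating state machine: scan each string char by char,
--     # counting 's' and bailing out (bucket 0) as soon as a third 's' appears;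
--     # tally buckets in an array indexed by the final state.
--     tallies = [0, 0, 0]
--     for smiles in smiles_list:
--         n = 0
--         for ch in smiles:
--             if ch == "s":
--                 n += 1
--                 if n == 3:
--                     n = 0
--                     break
--         tallies[n] += 1
--     return tallies[1], tallies[2]
-- ===== Notes on version B (the rewrite author's own statement) =====
-- stated objective: alternative
-- what changed: Replaces the substring-count primitive with its membership guard and two conditional accumulators by a per-character saturating state machine (early exit after the third 's') whose final state indexes a bucket array; the result is read off buckets 1 and 2.
import Mathlib
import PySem

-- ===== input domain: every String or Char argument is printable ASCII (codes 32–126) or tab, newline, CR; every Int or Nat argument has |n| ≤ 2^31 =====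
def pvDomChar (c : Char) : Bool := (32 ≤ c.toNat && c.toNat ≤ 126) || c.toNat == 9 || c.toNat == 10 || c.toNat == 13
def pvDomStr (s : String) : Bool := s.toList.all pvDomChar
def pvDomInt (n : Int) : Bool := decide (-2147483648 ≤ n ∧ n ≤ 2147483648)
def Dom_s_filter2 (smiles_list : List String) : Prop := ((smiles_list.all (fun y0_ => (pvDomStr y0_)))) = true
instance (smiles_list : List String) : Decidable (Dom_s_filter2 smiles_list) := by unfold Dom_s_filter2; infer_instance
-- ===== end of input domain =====

-- B replaces A's substring-count tests and membership guard by a per-character saturating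
-- state machine (early exit after a third 's') tallied into a bucket array; same result, both total.

-- ===== PORT A =====
def s_filter2 (smiles_list : List String) : Int × Int :=
  let r := smiles_list.foldl (fun (acc : Int × Int) smiles =>
    if PySem.Str.isIn "S" smiles || PySem.Str.isIn "s" smiles then
      if PySem.Str.count smiles "s" = 1 then (acc.1 + 1, acc.2)
      else if PySem.Str.count smiles "s" = 2 then (acc.1, acc.2 + 1)
      else acc
    else acc) (0, 0)
  (r.1, r.2)

-- ===== PORT B =====
-- the inner character loop of Source B: counter n, reset-and-break on the third 's'
def sScan : Nat → List Char → Nat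
  | n, [] => n
  | n, c :: t => if c = 's' then (if n + 1 = 3 then 0 else sScan (n + 1) t) else sScan n t

def s_filter2_alt (smiles_list : List String) : Int × Int :=
  let tallies := smiles_list.foldl
    (fun (tal : List Int) smiles => tal.modify (sScan 0 smiles.toList) (· + 1)) [0, 0, 0]
  -- tallies[1], tallies[2]: indices always in range for the 3-element list, so getD is exact
  (tallies.getD 1 0, tallies.getD 2 0)

-- ===== PRECONDITION & SPEC =====
def Spec_s_filter2 (smiles_list : List String) (out : Int × Int) : Prop := out = s_filter2_alt smiles_list
instance (smiles_list : List String) (out : Int × Int) : Decidable (Spec_s_filter2 smiles_list out) := by unfold Spec_s_filter2; infer_instance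

-- ===== CLAIM (what is proved, stated in full; the proofs are below) =====
def Claim_equal_s_filter2 : Prop := ∀ (smiles_list : List String), Dom_s_filter2 smiles_list → Spec_s_filter2 smiles_list (s_filter2 smiles_list)

-- ===== LEMMAS AND PROOFS =====

-- PySem.Chars.count with a single-character needle is List.count (proved on go with fuel ≥ length)
theorem pv_go_single (c : Char) : ∀ (l : List Char) (fuel acc : Nat), l.length ≤ fuel →
    PySem.Chars.count.go [c] fuel l acc = acc + l.count c := by
  intro l
  induction l with
  | nil => intro fuel acc h; cases fuel <;> simp [PySem.Chars.count.go]
  | cons h t ih =>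
    intro fuel acc hf
    cases fuel with
    | zero => simp at hf
    | succ n =>
      have step : PySem.Chars.count.go [c] (n+1) (h :: t) acc =
          if List.isPrefixOf [c] (h :: t) then
            PySem.Chars.count.go [c] n (List.drop [c].length (h :: t)) (acc+1)
          else PySem.Chars.count.go [c] n t acc := rfl
      have hpre : List.isPrefixOf [c] (h :: t) = (c == h) := by
        show (c == h && List.isPrefixOf [] t) = (c == h)
        simp [List.isPrefixOf]
      rw [step, hpre]
      by_cases hc : c = h
      · subst hc
        rw [beq_self_eq_true, if_pos rfl]
        simp only [List.length_cons, List.length_nil, Nat.zero_add, List.drop_succ_cons,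
          List.drop_zero]
        rw [ih n (acc+1) (by simpa using hf), List.count_cons_self]
        omega
      · rw [if_neg (by simpa using hc), ih n acc (by simpa using hf)]
        simp [Ne.symm hc]

theorem pv_count_s (s : String) : PySem.Str.count s "s" = s.toList.count 's' := by
  rw [PySem.Str.count_eq]
  simpa [PySem.Chars.count] using pv_go_single 's' s.toList s.toList.length 0 le_rfl

theorem pv_isIn_s (s : String) (h : 's' ∈ s.toList) : PySem.Str.isIn "s" s = true := by
  rw [PySem.Str.isIn_iff_infix]
  simpa using (List.singleton_infix_iff 's' s.toList).mpr h

-- A's per-element step: the S/s guard is implied whenever a branch fires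
theorem pv_stepA (acc : Int × Int) (s : String) :
    (if PySem.Str.isIn "S" s || PySem.Str.isIn "s" s then
      if PySem.Str.count s "s" = 1 then (acc.1 + 1, acc.2)
      else if PySem.Str.count s "s" = 2 then (acc.1, acc.2 + 1)
      else acc
    else acc) =
    (if PySem.Str.count s "s" = 1 then (acc.1 + 1, acc.2)
     else if PySem.Str.count s "s" = 2 then (acc.1, acc.2 + 1)
     else acc) := by
  by_cases hg : (PySem.Str.isIn "S" s || PySem.Str.isIn "s" s) = true
  · rw [if_pos hg]
  · rw [if_neg hg]
    have hs : ¬ PySem.Str.isIn "s" s = true := fun h => hg (by rw [h, Bool.or_true])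
    have hzero : s.toList.count 's' = 0 := by
      by_contra hz
      exact hs (pv_isIn_s s (List.count_pos_iff.mp (by omega)))
    have hc1 : ¬ PySem.Str.count s "s" = 1 := by rw [pv_count_s, hzero]; omega
    have hc2 : ¬ PySem.Str.count s "s" = 2 := by rw [pv_count_s, hzero]; omega
    rw [if_neg hc1, if_neg hc2]

-- the state machine computes the saturated 's'-count
theorem pv_sScan : ∀ (l : List Char) (n : Nat), n ≤ 2 →
    sScan n l = (if n + l.count 's' = 1 then 1 else if n + l.count 's' = 2 then 2 else 0) := by
  intro l
  induction l with
  | nil =>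
    intro n hn
    simp only [sScan, List.count_nil, Nat.add_zero]
    interval_cases n <;> simp
  | cons c t ih =>
    intro n hn
    by_cases hc : c = 's'
    · subst hc
      have hstep : sScan n ('s' :: t) = if n + 1 = 3 then 0 else sScan (n + 1) t := by
        simp [sScan]
      rw [hstep, List.count_cons_self]
      by_cases h3 : n + 1 = 3
      · rw [if_pos h3, if_neg (by omega), if_neg (by omega)]
      · rw [if_neg h3, ih (n + 1) (by omega)]
        split_ifs <;> omega
    · have hstep : sScan n (c :: t) = sScan n t := by simp [sScan, hc]
      have hcnt : (c :: t).count 's' = t.count 's' := by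
        simp only [List.count_cons]
        rw [if_neg (by simp [beq_iff_eq]; exact hc)]
        omega
      rw [hstep, hcnt, ih n hn]

-- B's fold over the 3-bucket array, characterised by per-class counts
theorem pv_foldB (l : List String) : ∀ (a b c : Int),
    l.foldl (fun (tal : List Int) smiles => tal.modify (sScan 0 smiles.toList) (· + 1)) [a, b, c] =
    [a + ((l.map (fun s => sScan 0 s.toList)).count 0 : Nat),
     b + ((l.map (fun s => sScan 0 s.toList)).count 1 : Nat),
     c + ((l.map (fun s => sScan 0 s.toList)).count 2 : Nat)] := by
  induction l with
  | nil => intro a b c; simp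
  | cons s t ih =>
    intro a b c
    rw [List.foldl_cons]
    have hval := pv_sScan s.toList 0 (by omega)
    simp only [Nat.zero_add] at hval
    by_cases h1 : s.toList.count 's' = 1
    · have hcls : sScan 0 s.toList = 1 := by rw [hval, if_pos h1]
      rw [hcls]
      show List.foldl _ [a, b + 1, c] t = _
      rw [ih a (b + 1) c]
      simp [hcls]
      omega
    · by_cases h2 : s.toList.count 's' = 2
      · have hcls : sScan 0 s.toList = 2 := by rw [hval, if_neg h1, if_pos h2]
        rw [hcls]
        show List.foldl _ [a, b, c + 1] t = _
        rw [ih a b (c + 1)]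
        simp [hcls]
        omega
      · have hcls : sScan 0 s.toList = 0 := by rw [hval, if_neg h1, if_neg h2]
        rw [hcls]
        show List.foldl _ [a + 1, b, c] t = _
        rw [ih (a + 1) b c]
        simp [hcls]
        omega

-- A's fold, characterised by counts of the per-string 's'-count classes
theorem pv_foldA (l : List String) : ∀ (a b : Int),
    l.foldl (fun (acc : Int × Int) smiles =>
      if PySem.Str.isIn "S" smiles || PySem.Str.isIn "s" smiles then
        if PySem.Str.count smiles "s" = 1 then (acc.1 + 1, acc.2)
        else if PySem.Str.count smiles "s" = 2 then (acc.1, acc.2 + 1)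
        else acc
      else acc) (a, b) =
    (a + ((l.map (fun s => sScan 0 s.toList)).count 1 : Nat),
     b + ((l.map (fun s => sScan 0 s.toList)).count 2 : Nat)) := by
  induction l with
  | nil => intro a b; simp
  | cons s t ih =>
    intro a b
    rw [List.foldl_cons, pv_stepA (a, b) s]
    have hval := pv_sScan s.toList 0 (by omega)
    simp only [Nat.zero_add] at hval
    rw [pv_count_s]
    by_cases h1 : s.toList.count 's' = 1
    · have hcls : sScan 0 s.toList = 1 := by rw [hval, if_pos h1]
      rw [if_pos h1, ih (a + 1) b]
      simp [hcls, Prod.ext_iff]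
      omega
    · by_cases h2 : s.toList.count 's' = 2
      · have hcls : sScan 0 s.toList = 2 := by rw [hval, if_neg h1, if_pos h2]
        rw [if_neg h1, if_pos h2, ih a (b + 1)]
        simp [hcls, Prod.ext_iff]
        omega
      · have hcls : sScan 0 s.toList = 0 := by rw [hval, if_neg h1, if_neg h2]
        rw [if_neg h1, if_neg h2, ih a b]
        simp [hcls]

-- ===== VERDICT (by name: the statement is the Claim_ definition above) =====
theorem s_filter2_spec : Claim_equal_s_filter2 := by
  intro smiles_list _
  unfold Spec_s_filter2 s_filter2 s_filter2_alt
  rw [pv_foldA smiles_list 0 0, pv_foldB smiles_list 0 0 0]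
  simp
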